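-- pv_equiv track=rewrite | github.com/indiefan/RetroSync | retrosync/sources/everdrive64/adapter.py | _pick_by_region
-- ===== SOURCE A (Python) =====
-- _SINGLE_LETTER_REGIONS = {"u": "usa", "e": "europe", "j": "japan",
--                           "w": "world"}
--
-- def _pick_by_region(names: list[str],
--                     preference: tuple[str, ...]) -> str:
--     """Same shape as the Pocket / filename_map region preference logic."""
--     def rank(name: str) -> int:
--         lname = name.lower()
--         for i, want in enumerate(preference):
--             if want in lname:
--                 return i
--             for letter, full in _SINGLE_LETTER_REGIONS.items():
--                 if full == want and (
--                         f"({letter})" in lname or f"({letter}," in lname):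
--                     return i
--         return len(preference)
--     return sorted(names, key=lambda n: (rank(n), n))[0]
-- ===== SOURCE B (Python) =====
-- _SINGLE_LETTER_REGIONS = {"u": "usa", "e": "europe", "j": "japan",
--                           "w": "world"}
--
-- def _matches(lname: str, want: str) -> bool:
--     if want in lname:
--         return True
--     for letter, full in _SINGLE_LETTER_REGIONS.items():
--         if full == want and (f"({letter})" in lname or f"({letter}," in lname):
--             return True
--     return False
--
-- def _pick_by_region(names: list[str],
--                     preference: tuple[str, ...]) -> str:
--     for want in preference:
--         best = None
--         for n in names:
--             if _matches(n.lower(), want):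
--                 if best is None or n < best:
--                     best = n
--         if best is not None:
--             return best
--     best = names[0]
--     for n in names[1:]:
--         if n < best:
--             best = n
--     return best
-- ===== Notes on version B (the rewrite author's own statement) =====
-- stated objective: faster
-- what changed: B replaces A's rank-every-name-then-sort-then-take-first with an early-returning loop over the preferences that keeps a running lexicographic minimum of the names matching the current preference, falling back to the overall minimum; no rank function and no sort.
import Mathlib
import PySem

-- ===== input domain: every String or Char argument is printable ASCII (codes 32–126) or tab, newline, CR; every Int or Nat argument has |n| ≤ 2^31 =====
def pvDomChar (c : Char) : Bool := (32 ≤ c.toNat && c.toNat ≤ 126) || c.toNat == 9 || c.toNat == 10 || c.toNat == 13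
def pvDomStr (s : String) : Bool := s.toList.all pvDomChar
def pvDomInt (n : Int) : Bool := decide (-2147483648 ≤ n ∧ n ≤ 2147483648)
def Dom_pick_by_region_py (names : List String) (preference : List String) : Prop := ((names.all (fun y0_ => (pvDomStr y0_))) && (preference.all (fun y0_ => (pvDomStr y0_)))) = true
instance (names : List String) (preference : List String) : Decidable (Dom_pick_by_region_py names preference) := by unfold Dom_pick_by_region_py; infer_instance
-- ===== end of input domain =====

-- B replaces A's rank-then-sort-then-take-first with an early-returning loop over the
-- preferences that keeps a running lexicographic minimum of the matching names (objective: alternative decomposition, no sort).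
-- ===== PORT A =====
def pvRegions : List (String × String) := [("u", "usa"), ("e", "europe"), ("j", "japan"), ("w", "world")]

def rankLoop (lname : String) : List String → Nat → Nat
  | [], i => i
  | want :: rest, i =>
    if PySem.Str.isIn want lname then i
    else if pvRegions.any (fun p => p.2 == want &&
        (PySem.Str.isIn ("(" ++ p.1 ++ ")") lname || PySem.Str.isIn ("(" ++ p.1 ++ ",") lname)) then i
    else rankLoop lname rest (i + 1)

def rankA (preference : List String) (name : String) : Nat :=
  rankLoop (PySem.Str.lower name) preference 0

def pick_by_region_py (names : List String) (preference : List String) : String :=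
  match PySem.List.sorted2 names (fun n => rankA preference n) (fun n => n) false with
  | x :: _ => x
  | [] => ""   -- sorted(names, key=...)[0] raises IndexError here; excluded by Pre_

-- ===== PORT B =====
def matchesB (lname want : String) : Bool :=
  PySem.Str.isIn want lname ||
  pvRegions.any (fun p => p.2 == want &&
    (PySem.Str.isIn ("(" ++ p.1 ++ ")") lname || PySem.Str.isIn ("(" ++ p.1 ++ ",") lname))

def bestMatch (names : List String) (want : String) : Option String :=
  names.foldl (fun best n =>
    if matchesB (PySem.Str.lower n) want then
      match best with
      | none => some n
      | some b => if n < b then some n else some b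
    else best) none

def pickFallback : List String → String → String
  | [], best => best
  | n :: rest, best => pickFallback rest (if n < best then n else best)

def pickLoop (names : List String) : List String → String
  | [] =>
    match names with
    | n :: rest => pickFallback rest n
    | [] => ""   -- names[0] raises IndexError here; excluded by Pre_
  | want :: rest =>
    match bestMatch names want with
    | some b => b
    | none => pickLoop names rest

def pick_by_region_py_alt (names : List String) (preference : List String) : String :=
  pickLoop names preference

-- ===== PRECONDITION & SPEC =====
-- Pre_ excludes only empty `names`, on which both Pythons raise IndexError.
def Pre_pick_by_region_py (names : List String) (preference : List String) : Prop := names ≠ []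
instance (names : List String) (preference : List String) : Decidable (Pre_pick_by_region_py names preference) := by unfold Pre_pick_by_region_py; infer_instance
def pvWitness_pick_by_region_py : List String × List String := (["Game (U)", "Game (E)"], ["europe", "usa"])

def Spec_pick_by_region_py (names : List String) (preference : List String) (out : String) : Prop := out = pick_by_region_py_alt names preference
instance (names : List String) (preference : List String) (out : String) : Decidable (Spec_pick_by_region_py names preference out) := by unfold Spec_pick_by_region_py; infer_instance

-- ===== CLAIM (what is proved, stated in full; the proofs are below) =====
def Claim_equal_pick_by_region_py : Prop := ∀ (names : List String) (preference : List String), Dom_pick_by_region_py names preference → Pre_pick_by_region_py names preference → Spec_pick_by_region_py names preference (pick_by_region_py names preference)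

-- ===== LEMMAS AND PROOFS =====

-- lexicographic order on (rank, name): the characterisation both results satisfy
def LexLE (pref : List String) (a b : String) : Prop :=
  rankA pref a < rankA pref b ∨ (rankA pref a = rankA pref b ∧ a ≤ b)

def IsPick (names : List String) (pref : List String) (v : String) : Prop :=
  v ∈ names ∧ ∀ y ∈ names, LexLE pref v y

theorem lexle_trans {pref : List String} {a b c : String} (h1 : LexLE pref a b) (h2 : LexLE pref b c) : LexLE pref a c := by
  rcases h1 with h1 | ⟨h1, h1'⟩ <;> rcases h2 with h2 | ⟨h2, h2'⟩
  · exact Or.inl (h1.trans h2)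
  · exact Or.inl (h2 ▸ h1)
  · exact Or.inl (h1 ▸ h2)
  · exact Or.inr ⟨h1.trans h2, h1'.trans h2'⟩

theorem isPick_unique {names pref : List String} {v w : String}
    (hv : IsPick names pref v) (hw : IsPick names pref w) : v = w := by
  rcases hv with ⟨hvm, hvle⟩
  rcases hw with ⟨hwm, hwle⟩
  rcases hvle w hwm with h1 | ⟨h1, h1'⟩ <;> rcases hwle v hvm with h2 | ⟨h2, h2'⟩ <;>
    first | omega | exact le_antisymm h1' h2'

-- rank in terms of the boolean match predicate
theorem if_or_nat {a b : Bool} {i r : Nat} :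
    (if a = true then i else if b = true then i else r) = (if (a || b) = true then i else r) := by
  cases a <;> cases b <;> simp

theorem rankLoop_cons (lname w : String) (rest : List String) (i : Nat) :
    rankLoop lname (w :: rest) i =
      if matchesB lname w then i else rankLoop lname rest (i + 1) := by
  simp only [rankLoop, matchesB]
  exact if_or_nat

theorem rankLoop_succ (lname : String) (prefs : List String) : ∀ i : Nat,
    rankLoop lname prefs (i + 1) = rankLoop lname prefs i + 1 := by
  induction prefs with
  | nil => intro i; simp [rankLoop]
  | cons w rest ih =>
    intro i
    rw [rankLoop_cons, rankLoop_cons]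
    split
    · rfl
    · exact ih (i + 1)

theorem rankA_cons (pref : List String) (w n : String) :
    rankA (w :: pref) n =
      if matchesB (PySem.Str.lower n) w then 0 else rankA pref n + 1 := by
  unfold rankA
  rw [rankLoop_cons]
  split
  · rfl
  · exact rankLoop_succ _ _ 0

-- head of the insertion-sort fold is the running binary minimum
theorem head?_foldl_insertBy (before : String → String → Bool) :
    ∀ (xs : List String) (m : String) (as : List String),
      (xs.foldl (fun acc x => PySem.List.insertBy before x acc) (m :: as)).head? =
        some (xs.foldl (fun m x => if before x m then x else m) m) := by
  intro xs
  induction xs with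
  | nil => intro m as; rfl
  | cons x rest ih =>
    intro m as
    simp only [List.foldl_cons, PySem.List.insertBy]
    by_cases h : before x m = true
    · rw [if_pos h, if_pos h]
      exact ih x (m :: as)
    · rw [if_neg h, if_neg h]
      exact ih m (PySem.List.insertBy before x as)

-- the comparison sorted2 uses, on our keys
def ltB (pref : List String) (x m : String) : Bool :=
  decide (rankA pref x < rankA pref m) ||
    (!decide (rankA pref m < rankA pref x) && decide (x < m))

theorem ltB_true {pref : List String} {x m : String} (h : ltB pref x m = true) : LexLE pref x m := by
  by_cases h1 : rankA pref x < rankA pref m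
  · exact Or.inl h1
  · by_cases h2 : rankA pref m < rankA pref x
    · exfalso
      unfold ltB at h
      rw [decide_eq_false h1, decide_eq_true h2] at h
      simp at h
    · have hx : x < m := by
        unfold ltB at h
        rw [decide_eq_false h1, decide_eq_false h2] at h
        simpa using h
      exact Or.inr ⟨by omega, le_of_lt hx⟩

theorem ltB_false {pref : List String} {x m : String} (h : ltB pref x m = false) : LexLE pref m x := by
  by_cases h2 : rankA pref m < rankA pref x
  · exact Or.inl h2
  · by_cases h1 : rankA pref x < rankA pref m
    · exfalso
      unfold ltB at h
      rw [decide_eq_true h1] at h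
      simp at h
    · have hx : ¬ x < m := by
        unfold ltB at h
        rw [decide_eq_false h1, decide_eq_false h2] at h
        simpa using h
      exact Or.inr ⟨by omega, not_lt.mp hx⟩

theorem foldl_min_isPick (pref : List String) :
    ∀ (rest : List String) (m : String),
      (rest.foldl (fun m x => if ltB pref x m then x else m) m) ∈ m :: rest ∧
      LexLE pref (rest.foldl (fun m x => if ltB pref x m then x else m) m) m ∧
      ∀ y ∈ rest, LexLE pref (rest.foldl (fun m x => if ltB pref x m then x else m) m) y := by
  intro rest
  induction rest with
  | nil =>
    intro m
    exact ⟨List.mem_singleton.mpr rfl, Or.inr ⟨rfl, le_refl m⟩,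
      fun y hy => absurd hy List.not_mem_nil⟩
  | cons x rest ih =>
    intro m
    simp only [List.foldl_cons]
    by_cases h : ltB pref x m = true
    · rw [if_pos h]
      obtain ⟨hmem, hle, hall⟩ := ih x
      refine ⟨?_, lexle_trans hle (ltB_true h), ?_⟩
      · rcases List.mem_cons.mp hmem with h' | h'
        · exact List.mem_cons.mpr (Or.inr (List.mem_cons.mpr (Or.inl h')))
        · exact List.mem_cons.mpr (Or.inr (List.mem_cons.mpr (Or.inr h')))
      · intro y hy
        rcases List.mem_cons.mp hy with rfl | hy'
        · exact hle
        · exact hall y hy'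
    · rw [if_neg h]
      have hf : ltB pref x m = false := by
        cases hb : ltB pref x m
        · rfl
        · exact absurd hb h
      obtain ⟨hmem, hle, hall⟩ := ih m
      refine ⟨?_, hle, ?_⟩
      · rcases List.mem_cons.mp hmem with h' | h'
        · exact List.mem_cons.mpr (Or.inl h')
        · exact List.mem_cons.mpr (Or.inr (List.mem_cons.mpr (Or.inr h')))
      · intro y hy
        rcases List.mem_cons.mp hy with rfl | hy'
        · exact lexle_trans hle (ltB_false hf)
        · exact hall y hy'

-- A's result satisfies IsPick
theorem portA_isPick (pref : List String) (n : String) (rest : List String) :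
    IsPick (n :: rest) pref (pick_by_region_py (n :: rest) pref) := by
  have hs : PySem.List.sorted2 (n :: rest) (fun x => rankA pref x) (fun x => x) false =
      rest.foldl (fun acc x => PySem.List.insertBy (ltB pref) x acc) [n] := rfl
  have hhd := head?_foldl_insertBy (ltB pref) rest n []
  have hval : pick_by_region_py (n :: rest) pref =
      rest.foldl (fun m x => if ltB pref x m then x else m) n := by
    unfold pick_by_region_py
    rw [hs]
    cases hL : rest.foldl (fun acc x => PySem.List.insertBy (ltB pref) x acc) [n] with
    | nil => rw [hL] at hhd; exact absurd hhd (by simp)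
    | cons a t =>
      rw [hL] at hhd
      exact Option.some.inj hhd
  rw [hval]
  obtain ⟨hmem, hle, hall⟩ := foldl_min_isPick pref rest n
  refine ⟨hmem, ?_⟩
  intro y hy
  rcases List.mem_cons.mp hy with rfl | hy'
  · exact hle
  · exact hall y hy'

-- B-side specs
def bmStep (w : String) (best : Option String) (n : String) : Option String :=
  if matchesB (PySem.Str.lower n) w then
    match best with
    | none => some n
    | some b => if n < b then some n else some b
  else best

theorem bestMatch_eq (names : List String) (w : String) :
    bestMatch names w = names.foldl (bmStep w) none := rfl

theorem bm_go_some (w : String) : ∀ (names : List String) (acc : Option String) (b : String),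
    names.foldl (bmStep w) acc = some b →
      (acc = some b ∨ (b ∈ names ∧ matchesB (PySem.Str.lower b) w = true)) ∧
      (∀ y ∈ names, matchesB (PySem.Str.lower y) w = true → b ≤ y) ∧
      (∀ a, acc = some a → b ≤ a) := by
  intro names
  induction names with
  | nil =>
    intro acc b hb
    refine ⟨Or.inl hb, fun y hy _ => absurd hy List.not_mem_nil, fun a ha => ?_⟩
    rw [ha] at hb
    exact le_of_eq (Option.some.inj hb).symm
  | cons n rest ih =>
    intro acc b hb
    simp only [List.foldl_cons] at hb
    obtain ⟨h1, h2, h3⟩ := ih (bmStep w acc n) b hb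
    by_cases hm : matchesB (PySem.Str.lower n) w = true
    · cases acc with
      | none =>
        have hstep : bmStep w none n = some n := by simp [bmStep, hm]
        rw [hstep] at h1 h3
        have hbn : b ≤ n := h3 n rfl
        refine ⟨?_, ?_, fun a ha => absurd ha (by simp)⟩
        · rcases h1 with h | ⟨hq1, hq2⟩
          · exact Or.inr ⟨List.mem_cons.mpr (Or.inl (Option.some.inj h).symm),
              by rw [(Option.some.inj h).symm]; exact hm⟩
          · exact Or.inr ⟨List.mem_cons.mpr (Or.inr hq1), hq2⟩
        · intro y hy hmy
          rcases List.mem_cons.mp hy with rfl | hy'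
          · exact hbn
          · exact h2 y hy' hmy
      | some a0 =>
        by_cases hna : n < a0
        · have hstep : bmStep w (some a0) n = some n := by simp [bmStep, hm, hna]
          rw [hstep] at h1 h3
          have hbn : b ≤ n := h3 n rfl
          refine ⟨?_, ?_, ?_⟩
          · rcases h1 with h | ⟨hq1, hq2⟩
            · exact Or.inr ⟨List.mem_cons.mpr (Or.inl (Option.some.inj h).symm),
                by rw [(Option.some.inj h).symm]; exact hm⟩
            · exact Or.inr ⟨List.mem_cons.mpr (Or.inr hq1), hq2⟩
          · intro y hy hmy
            rcases List.mem_cons.mp hy with rfl | hy'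
            · exact hbn
            · exact h2 y hy' hmy
          · intro a ha
            cases Option.some.inj ha
            exact le_trans hbn (le_of_lt hna)
        · have hstep : bmStep w (some a0) n = some a0 := by simp [bmStep, hm, hna]
          rw [hstep] at h1 h3
          have hba : b ≤ a0 := h3 a0 rfl
          refine ⟨?_, ?_, ?_⟩
          · rcases h1 with h | ⟨hq1, hq2⟩
            · exact Or.inl (by rw [Option.some.inj h])
            · exact Or.inr ⟨List.mem_cons.mpr (Or.inr hq1), hq2⟩
          · intro y hy hmy
            rcases List.mem_cons.mp hy with rfl | hy'
            · exact le_trans hba (not_lt.mp hna)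
            · exact h2 y hy' hmy
          · intro a ha
            rw [← Option.some.inj ha]
            exact hba
    · have hstep : bmStep w acc n = acc := by simp [bmStep, hm]
      rw [hstep] at h1 h3
      refine ⟨?_, ?_, h3⟩
      · rcases h1 with h | ⟨hq1, hq2⟩
        · exact Or.inl h
        · exact Or.inr ⟨List.mem_cons.mpr (Or.inr hq1), hq2⟩
      · intro y hy hmy
        rcases List.mem_cons.mp hy with rfl | hy'
        · exact absurd hmy hm
        · exact h2 y hy' hmy

theorem bm_go_none (w : String) : ∀ (names : List String) (acc : Option String),
    names.foldl (bmStep w) acc = none →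
      acc = none ∧ ∀ y ∈ names, ¬ matchesB (PySem.Str.lower y) w = true := by
  intro names
  induction names with
  | nil =>
    intro acc h
    exact ⟨h, fun y hy => absurd hy List.not_mem_nil⟩
  | cons n rest ih =>
    intro acc hb
    simp only [List.foldl_cons] at hb
    obtain ⟨hacc, hall⟩ := ih (bmStep w acc n) hb
    by_cases hm : matchesB (PySem.Str.lower n) w = true
    · exfalso
      cases acc with
      | none => simp [bmStep, hm] at hacc
      | some a0 => by_cases hna : n < a0 <;> simp [bmStep, hm, hna] at hacc
    · have hstep : bmStep w acc n = acc := by simp [bmStep, hm]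
      rw [hstep] at hacc
      refine ⟨hacc, ?_⟩
      intro y hy
      rcases List.mem_cons.mp hy with rfl | hy'
      · exact hm
      · exact hall y hy'

theorem pickFallback_spec : ∀ (rest : List String) (m : String),
    pickFallback rest m ∈ m :: rest ∧ pickFallback rest m ≤ m ∧
      ∀ y ∈ rest, pickFallback rest m ≤ y := by
  intro rest
  induction rest with
  | nil =>
    intro m
    exact ⟨List.mem_singleton.mpr rfl, le_refl m, fun y hy => absurd hy List.not_mem_nil⟩
  | cons x rest ih =>
    intro m
    simp only [pickFallback]
    by_cases hx : x < m
    · rw [if_pos hx]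
      obtain ⟨hmem, hle, hall⟩ := ih x
      refine ⟨?_, le_trans hle (le_of_lt hx), ?_⟩
      · rcases List.mem_cons.mp hmem with h' | h'
        · exact List.mem_cons.mpr (Or.inr (List.mem_cons.mpr (Or.inl h')))
        · exact List.mem_cons.mpr (Or.inr (List.mem_cons.mpr (Or.inr h')))
      · intro y hy
        rcases List.mem_cons.mp hy with rfl | hy'
        · exact hle
        · exact hall y hy'
    · rw [if_neg hx]
      obtain ⟨hmem, hle, hall⟩ := ih m
      refine ⟨?_, hle, ?_⟩
      · rcases List.mem_cons.mp hmem with h' | h'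
        · exact List.mem_cons.mpr (Or.inl h')
        · exact List.mem_cons.mpr (Or.inr (List.mem_cons.mpr (Or.inr h')))
      · intro y hy
        rcases List.mem_cons.mp hy with rfl | hy'
        · exact le_trans hle (not_lt.mp hx)
        · exact hall y hy'

theorem pickLoop_isPick (prefs : List String) : ∀ (names : List String), names ≠ [] →
    IsPick names prefs (pickLoop names prefs) := by
  induction prefs with
  | nil =>
    intro names hne
    cases names with
    | nil => exact absurd rfl hne
    | cons n rest =>
      simp only [pickLoop]
      obtain ⟨hmem, hle, hall⟩ := pickFallback_spec rest n
      refine ⟨hmem, ?_⟩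
      intro y hy
      rcases List.mem_cons.mp hy with rfl | hy'
      · exact Or.inr ⟨rfl, hle⟩
      · exact Or.inr ⟨rfl, hall y hy'⟩
  | cons w rest ih =>
    intro names hne
    cases hbm : bestMatch names w with
    | some b =>
      simp only [pickLoop, hbm]
      have hspec := bm_go_some w names none b (by rw [← bestMatch_eq]; exact hbm)
      obtain ⟨h1, hmin, _⟩ := hspec
      have hbmem : b ∈ names ∧ matchesB (PySem.Str.lower b) w = true := by
        rcases h1 with h | h
        · exact absurd h (by simp)
        · exact h
      refine ⟨hbmem.1, ?_⟩
      intro y hy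
      have hrb : rankA (w :: rest) b = 0 := by rw [rankA_cons, if_pos hbmem.2]
      by_cases hmy : matchesB (PySem.Str.lower y) w = true
      · have hry : rankA (w :: rest) y = 0 := by rw [rankA_cons, if_pos hmy]
        exact Or.inr ⟨by omega, hmin y hy hmy⟩
      · have hry : rankA (w :: rest) y = rankA rest y + 1 := by
          rw [rankA_cons, if_neg hmy]
        exact Or.inl (by omega)
    | none =>
      simp only [pickLoop, hbm]
      have hnomatch := (bm_go_none w names none (by rw [← bestMatch_eq]; exact hbm)).2
      obtain ⟨hrmem, hrall⟩ := ih names hne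
      refine ⟨hrmem, ?_⟩
      intro y hy
      have hsy : rankA (w :: rest) y = rankA rest y + 1 := by
        rw [rankA_cons, if_neg (hnomatch y hy)]
      have hsr : rankA (w :: rest) (pickLoop names rest) = rankA rest (pickLoop names rest) + 1 := by
        rw [rankA_cons, if_neg (hnomatch _ hrmem)]
      rcases hrall y hy with h | ⟨h1, h2⟩
      · exact Or.inl (by omega)
      · exact Or.inr ⟨by omega, h2⟩

-- ===== VERDICT (by name: the statement is the Claim_ definition above) =====
theorem pick_by_region_py_spec : Claim_equal_pick_by_region_py := by
  intro names preference _hdom hpre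
  unfold Spec_pick_by_region_py pick_by_region_py_alt
  cases names with
  | nil => exact absurd rfl hpre
  | cons n rest =>
    exact isPick_unique (portA_isPick preference n rest)
      (pickLoop_isPick preference (n :: rest) (by simp))
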